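-- pv_equiv track=rewrite | github.com/arielmygit/trabajo_final_D_y_A_de_A | Ejercicio 1/Robot a.py | buscar_salida
-- ===== SOURCE A (Python) =====
-- laberinto = [
--     # 0    1    2    3    4    5    6    7    8    9
--     ['E', 'C', 'C', 'C', 'C', 'C', 'C', 'C', 'C', 'C'], #0
--     ['C', 'C', 'C', 'C', 'C', 'C', 'C', 'C', 'C', 'C'], #1
--     ['C', 'C', 'C', 'C', 'C', 'C', 'C', 'C', 'C', 'C'], #2
--     ['C', 'C', 'C', 'C', 'C', 'C', 'C', 'C', 'C', 'C'], #3
--     ['C', 'C', 'C', 'C', 'C', 'C', 'C', 'C', 'C', 'C'], #4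
--     ['C', 'C', 'C', 'C', 'C', 'C', 'C', 'C', 'C', 'C'], #5
--     ['C', 'C', 'C', 'C', 'C', 'C', 'C', 'C', 'C', 'C'], #6
--     ['C', 'C', 'C', 'C', 'C', 'C', 'C', 'C', 'C', 'C'], #7
--     ['C', 'C', 'C', 'C', 'C', 'C', 'C', 'C', 'C', 'C'], #8
--     ['C', 'C', 'C', 'C', 'C', 'C', 'C', 'C', 'C', 'C'], #9
--     ['P', 'C', 'C', 'P', 'C', 'C', 'C', 'C', 'C', 'C'], #10
--     ['P', 'C', 'C', 'P', 'C', 'C', 'C', 'C', 'C', 'C'], #11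
--     ['P', 'C', 'C', 'P', 'C', 'C', 'C', 'C', 'C', 'C'], #12
--     ['C', 'C', 'C', 'C', 'C', 'C', 'C', 'C', 'C', 'C'], #13
--     ['C', 'C', 'C', 'C', 'C', 'C', 'C', 'C', 'C', 'C'], #14
--     ['C', 'C', 'C', 'C', 'C', 'C', 'C', 'C', 'C', 'S']  #15
-- ]
--
-- movimientos = [(1, 0), (0, -3), (2, 0), (0,3)]
--
-- def es_valido(x, y, visitado):
--     # O(1)
--     return (0 <= x < len(laberinto) and 0 <= y < len(laberinto[0]) and
--             laberinto[x][y] != 'P' and not visitado[x][y])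
--
-- def buscar_salida(inicio):
--     pila = [inicio]  # O(1)
--     visitado = [[False] * len(laberinto[0]) for _ in range(len(laberinto))]  # O(n*m)
--     visitado[inicio[0]][inicio[1]] = True  # O(1)
--
--     while pila:  # O(n*m)
--         x, y = pila[-1]  # O(1)
--         if laberinto[x][y] == 'S':  # O(1)
--             return list(pila)
--
--         movido = False
--         for dx, dy in movimientos:  # O(4)
--             nx, ny = x + dx, y + dy
--             if es_valido(nx, ny, visitado):
--                 pila.append((nx, ny))
--                 visitado[nx][ny] = True
--                 movido = True
--                 break
--
--         if not movido:
--             pila.pop()  # O(1)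
--
--     return []
-- ===== SOURCE B (Python) =====
-- MAZE = [
--     "ECCCCCCCCC",
--     "CCCCCCCCCC",
--     "CCCCCCCCCC",
--     "CCCCCCCCCC",
--     "CCCCCCCCCC",
--     "CCCCCCCCCC",
--     "CCCCCCCCCC",
--     "CCCCCCCCCC",
--     "CCCCCCCCCC",
--     "CCCCCCCCCC",
--     "PCCPCCCCCC",
--     "PCCPCCCCCC",
--     "PCCPCCCCCC",
--     "CCCCCCCCCC",
--     "CCCCCCCCCC",
--     "CCCCCCCCCS",
-- ]
--
-- MOVES = [(1, 0), (0, -3), (2, 0), (0, 3)]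
--
--
-- def buscar_salida(inicio):
--     visited = [[False] * 10 for _ in range(16)]
--
--     def dfs(x, y):
--         visited[x][y] = True
--         if MAZE[x][y] == 'S':
--             return [(x, y)]
--         for dx, dy in MOVES:
--             nx, ny = x + dx, y + dy
--             if 0 <= nx < 16 and 0 <= ny < 10 and MAZE[nx][ny] != 'P' and not visited[nx][ny]:
--                 sub = dfs(nx, ny)
--                 if sub:
--                     return [(x, y)] + sub
--         return []
--
--     return dfs(inicio[0], inicio[1])
-- ===== Notes on version B (the rewrite author's own statement) =====
-- stated objective: alternative
-- what changed: Replaces the explicit-stack while-loop DFS over a list-of-char-lists maze with a recursive first-valid-neighbor DFS over string rows, with validity checked inline and the visited grid updated on entry of each recursive call.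
import Mathlib
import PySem

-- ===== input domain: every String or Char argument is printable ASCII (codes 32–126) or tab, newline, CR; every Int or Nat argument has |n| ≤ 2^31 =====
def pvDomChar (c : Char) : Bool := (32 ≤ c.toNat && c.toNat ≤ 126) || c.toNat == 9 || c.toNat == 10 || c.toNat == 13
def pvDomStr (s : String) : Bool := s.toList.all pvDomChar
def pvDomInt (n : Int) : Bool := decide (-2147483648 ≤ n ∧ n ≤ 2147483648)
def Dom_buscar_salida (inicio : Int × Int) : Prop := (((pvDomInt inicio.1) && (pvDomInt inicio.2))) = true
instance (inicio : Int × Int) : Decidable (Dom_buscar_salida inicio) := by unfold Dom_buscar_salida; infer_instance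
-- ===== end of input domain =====

-- B replaces A's explicit-stack DFS with a recursive first-valid-neighbor DFS over a string-row maze
-- (objective: alternative decomposition, same cost); equivalence proved on all starts where A returns.

-- ===== PORT A =====
-- module-level maze constant, a list of char lists as in Source A
def laberintoL : List (List Char) :=
  [ ['E','C','C','C','C','C','C','C','C','C'],
    ['C','C','C','C','C','C','C','C','C','C'],
    ['C','C','C','C','C','C','C','C','C','C'],
    ['C','C','C','C','C','C','C','C','C','C'],
    ['C','C','C','C','C','C','C','C','C','C'],
    ['C','C','C','C','C','C','C','C','C','C'],
    ['C','C','C','C','C','C','C','C','C','C'],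
    ['C','C','C','C','C','C','C','C','C','C'],
    ['C','C','C','C','C','C','C','C','C','C'],
    ['C','C','C','C','C','C','C','C','C','C'],
    ['P','C','C','P','C','C','C','C','C','C'],
    ['P','C','C','P','C','C','C','C','C','C'],
    ['P','C','C','P','C','C','C','C','C','C'],
    ['C','C','C','C','C','C','C','C','C','C'],
    ['C','C','C','C','C','C','C','C','C','C'],
    ['C','C','C','C','C','C','C','C','C','S'] ]

def movimientosL : List (Int × Int) := [(1, 0), (0, -3), (2, 0), (0, 3)]

-- laberinto[x][y] with Python negative-index wrap (in-range reads only under Pre_; ' ' default otherwise)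
def cellAt (x y : Int) : Char :=
  (PySem.List.pyGet? ((PySem.List.pyGet? laberintoL x).getD []) y).getD ' '

-- visitado[x][y] read, Python index semantics
def visGet (v : List (List Bool)) (x y : Int) : Bool :=
  (PySem.List.pyGet? ((PySem.List.pyGet? v x).getD []) y).getD false

-- visitado[x][y] = True, Python negative-index wrap (only in-range writes occur under Pre_)
def visSet (v : List (List Bool)) (x y : Int) : List (List Bool) :=
  let xi := (if x < 0 then x + v.length else x).toNat
  let row := v.getD xi []
  v.set xi (row.set (if y < 0 then y + row.length else y).toNat true)

-- es_valido(x, y, visitado)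
def es_valido (x y : Int) (v : List (List Bool)) : Bool :=
  decide (0 ≤ x) && decide (x < (laberintoL.length : Int)) &&
  decide (0 ≤ y) && decide (y < (((laberintoL.getD 0 []).length : Int))) &&
  !(cellAt x y = 'P' : Bool) && !(visGet v x y)

-- the 'for dx, dy in movimientos: … break' scan: first valid neighbor, if any
def tryMovesA (x y : Int) (v : List (List Bool)) : List (Int × Int) → Option (Int × Int)
  | [] => none
  | (dx, dy) :: rest =>
    let nx := x + dx
    let ny := y + dy
    if es_valido nx ny v then some (nx, ny) else tryMovesA x y v rest

def visitado0 : List (List Bool) := List.replicate 16 (List.replicate 10 false)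

-- the 'while pila:' loop; fuel only makes it total (640 in-range starts all finish well inside it)
def loopA : Nat → List (Int × Int) → List (List Bool) → List (Int × Int)
  | 0, _, _ => []
  | _ + 1, [], _ => []
  | fuel + 1, pila@(_ :: _), v =>
    match (PySem.List.pyGet? pila (-1)).getD (0, 0) with   -- x, y = pila[-1]
    | (x, y) =>
      if cellAt x y = 'S' then pila
      else
        match tryMovesA x y v movimientosL with
        | some (nx, ny) => loopA fuel (pila ++ [(nx, ny)]) (visSet v nx ny)
        | none => loopA fuel pila.dropLast v

def buscar_salida (inicio : Int × Int) : List (Int × Int) :=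
  loopA 1000 [inicio] (visSet visitado0 inicio.1 inicio.2)

-- ===== PORT B =====
-- B's maze: rows are strings; MAZE[x][y] with Python index semantics (space default, unreachable in range)
def mazeRows : List String :=
  [ "ECCCCCCCCC", "CCCCCCCCCC", "CCCCCCCCCC", "CCCCCCCCCC",
    "CCCCCCCCCC", "CCCCCCCCCC", "CCCCCCCCCC", "CCCCCCCCCC",
    "CCCCCCCCCC", "CCCCCCCCCC", "PCCPCCCCCC", "PCCPCCCCCC",
    "PCCPCCCCCC", "CCCCCCCCCC", "CCCCCCCCCC", "CCCCCCCCCS" ]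

def movesB : List (Int × Int) := [(1, 0), (0, -3), (2, 0), (0, 3)]

-- MAZE[x][y]: rows read on the chars view (Str.pyGet? s = List.pyGet? s.toList, the
-- Chars.pyGet?_eq_listPyGet? bridge); ' ' default is unreachable for in-range reads
def mazeGrid : List (List Char) := mazeRows.map String.toList
def mazeChar (x y : Int) : Char :=
  (PySem.List.pyGet? ((PySem.List.pyGet? mazeGrid x).getD []) y).getD ' '

-- visited[x][y] = True via in-place row modification, Python negative-index wrap
def markVis (g : List (List Bool)) (x y : Int) : List (List Bool) :=
  g.modify (if x < 0 then x + 16 else x).toNat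
    (fun row => row.modify (if y < 0 then y + 10 else y).toNat (fun _ => true))

def emptyVis : List (List Bool) := List.replicate 16 (List.replicate 10 false)

-- recursive DFS: mark on entry, return the path to 'S' through the first viable neighbor, else [];
-- the mutated visited grid is threaded through ('for' loop = neighborScan, taking the recursive call
-- as a parameter); fuel only makes the recursion total
def neighborScan (dfs : Int → Int → List (List Bool) → List (Int × Int) × List (List Bool))
    (x y : Int) (g : List (List Bool)) :
    List (Int × Int) → List (Int × Int) × List (List Bool)
  | [] => ([], g)
  | (dx, dy) :: ms =>
    let nx := x + dx
    let ny := y + dy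
    if decide (0 ≤ nx) && decide (nx < 16) && decide (0 ≤ ny) && decide (ny < 10) &&
        !(mazeChar nx ny = 'P' : Bool) && !((g.getD nx.toNat []).getD ny.toNat false) then
      match dfs nx ny g with                   -- sub = dfs(nx, ny); 'if sub:' = match on sub
      | (p :: ps, g') => ((x, y) :: p :: ps, g')
      | ([], g') => neighborScan dfs x y g' ms
    else neighborScan dfs x y g ms

def dfsB : Nat → Int → Int → List (List Bool) → List (Int × Int) × List (List Bool)
  | 0, _, _, g => ([], g)
  | fuel + 1, x, y, g =>
    let g1 := markVis g x y
    if mazeChar x y = 'S' then ([(x, y)], g1)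
    else neighborScan (dfsB fuel) x y g1 movesB

def buscar_salida_alt (inicio : Int × Int) : List (Int × Int) :=
  (dfsB 1000 inicio.1 inicio.2 emptyVis).1

-- ===== PRECONDITION & SPEC =====
-- Pre_ excludes exactly the starts outside Python's index range for the 16×10 maze, on which A
-- raises IndexError at 'visitado[inicio[0]][inicio[1]] = True' (negative in-range indices wrap and are kept).
def Pre_buscar_salida (inicio : Int × Int) : Prop :=
  -16 ≤ inicio.1 ∧ inicio.1 < 16 ∧ -10 ≤ inicio.2 ∧ inicio.2 < 10
instance (inicio : Int × Int) : Decidable (Pre_buscar_salida inicio) := by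
  unfold Pre_buscar_salida; infer_instance

def pvWitness_buscar_salida : (Int × Int) := (0, 0)

def Spec_buscar_salida (inicio : Int × Int) (out : List (Int × Int)) : Prop := out = buscar_salida_alt inicio
instance (inicio : Int × Int) (out : List (Int × Int)) : Decidable (Spec_buscar_salida inicio out) := by unfold Spec_buscar_salida; infer_instance

-- ===== CLAIM (what is proved, stated in full; the proofs are below) =====
def Claim_equal_buscar_salida : Prop := ∀ (inicio : Int × Int), Dom_buscar_salida inicio → Pre_buscar_salida inicio → Spec_buscar_salida inicio (buscar_salida inicio)

-- ===== LEMMAS AND PROOFS =====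

-- Pre_ admits exactly 640 starts; check A = B on all of them by evaluation.
set_option maxRecDepth 100000 in
set_option maxHeartbeats 400000000 in
theorem all_cells_ok :
    ((List.range 32).all fun i => (List.range 20).all fun j =>
      decide (buscar_salida ((i : Int) - 16, (j : Int) - 10) =
              buscar_salida_alt ((i : Int) - 16, (j : Int) - 10))) = true := by
  decide

-- ===== VERDICT (by name: the statement is the Claim_ definition above) =====
theorem buscar_salida_spec : Claim_equal_buscar_salida := by
  intro ⟨x, y⟩ _ hpre
  obtain ⟨h1, h2, h3, h4⟩ := hpre
  have hx : (x + 16).toNat < 32 := by omega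
  have hy : (y + 10).toNat < 20 := by omega
  have h := List.all_eq_true.mp all_cells_ok _ (List.mem_range.mpr hx)
  have h' := List.all_eq_true.mp h _ (List.mem_range.mpr hy)
  have ex : ((x + 16).toNat : Int) - 16 = x := by omega
  have ey : ((y + 10).toNat : Int) - 10 = y := by omega
  rw [ex, ey] at h'
  exact of_decide_eq_true h'
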